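-- pv_equiv track=rewrite | github.com/ivlri/PyRevitExtensions | PyRevitExt/PyRevitExt.tab/Проверки ModelChecker.panel/Проверки ModelChecker.pulldown/save/script.py | get_user_group
-- ===== SOURCE A (Python) =====
-- def get_user_group(username):
--     username_clean = username.lower()
--     if any(name in username_clean for name in AR):
--         return 'AR'
--     if any(name in username_clean for name in SC):
--         return 'SC'
--     if any(name in username_clean for name in WSS):
--         return 'WSS'
--     if any(name in username_clean for name in HWAC):
--         return 'HWAC'
--     if any(name in username_clean for name in ESS):
--         return 'ESS'
--     return None
--
-- AR = ['chernova', 'stepanova','sidelnikova','mitchishnina','pitkina','legostaev1']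
--
-- SC = ['vasilkovskaya',
--       'karnauhova_av',
--       'neustroeva',
--       'gavrilovskaya',
--       'vashchenko_sa',
--       'polyakov',
--       'chelovyan',
--       'stradova',
--       'vakarina',
--       'vashchenko',
--       'ushakov',
--       'rybakov',
--       'lobov'
--       ]
--
-- WSS = ['gribacheva','krotenko','shkavro','medvedev']
--
-- HWAC = ['strelbitskaya','shahtarin','turusheva']
--
-- ESS = ['mansurova']
-- ===== SOURCE B (Python) =====
-- # B: flat pattern->group index; collect the priority ranks of ALL matching patterns
-- # and return the group with the minimal rank, instead of five staged early-return checks.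
-- PATTERN_GROUP = {
--     'chernova': 'AR', 'stepanova': 'AR', 'sidelnikova': 'AR', 'mitchishnina': 'AR',
--     'pitkina': 'AR', 'legostaev1': 'AR',
--     'vasilkovskaya': 'SC', 'karnauhova_av': 'SC', 'neustroeva': 'SC', 'gavrilovskaya': 'SC',
--     'vashchenko_sa': 'SC', 'polyakov': 'SC', 'chelovyan': 'SC', 'stradova': 'SC',
--     'vakarina': 'SC', 'vashchenko': 'SC', 'ushakov': 'SC', 'rybakov': 'SC', 'lobov': 'SC',
--     'gribacheva': 'WSS', 'krotenko': 'WSS', 'shkavro': 'WSS', 'medvedev': 'WSS',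
--     'strelbitskaya': 'HWAC', 'shahtarin': 'HWAC', 'turusheva': 'HWAC',
--     'mansurova': 'ESS',
-- }
--
-- ORDER = ['AR', 'SC', 'WSS', 'HWAC', 'ESS']
-- PRIORITY = {g: i for i, g in enumerate(ORDER)}
--
-- def get_user_group(username):
--     u = username.lower()
--     ranks = [PRIORITY[g] for p, g in PATTERN_GROUP.items() if p in u]
--     if not ranks:
--         return None
--     return ORDER[min(ranks)]
-- ===== Notes on version B (the rewrite author's own statement) =====
-- stated objective: alternative
-- what changed: Instead of five staged early-return any-checks, B inverts the tables into one flat pattern->group map, collects the priority ranks of every matching pattern in a single comprehension, and returns the group of the minimal rank (min-by-rank over all matches instead of first-group-that-matches).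
import Mathlib
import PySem

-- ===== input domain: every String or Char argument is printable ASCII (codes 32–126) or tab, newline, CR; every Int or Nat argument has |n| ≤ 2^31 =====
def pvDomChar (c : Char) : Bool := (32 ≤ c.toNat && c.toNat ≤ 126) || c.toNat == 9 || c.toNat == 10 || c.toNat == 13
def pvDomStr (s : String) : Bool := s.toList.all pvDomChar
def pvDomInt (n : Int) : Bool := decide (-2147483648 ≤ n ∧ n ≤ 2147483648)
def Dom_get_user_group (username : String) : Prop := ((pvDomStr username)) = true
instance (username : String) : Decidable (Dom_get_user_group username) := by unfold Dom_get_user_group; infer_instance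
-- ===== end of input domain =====

-- B inverts the five group tables into one flat pattern->group map, collects the priority ranks of
-- ALL matching patterns and returns the group of minimal rank, instead of five staged early-return
-- checks (objective: alternative).

-- ===== PORT A =====
def pyAR : List String := ["chernova", "stepanova", "sidelnikova", "mitchishnina", "pitkina", "legostaev1"]
def pySC : List String := ["vasilkovskaya", "karnauhova_av", "neustroeva", "gavrilovskaya", "vashchenko_sa",
  "polyakov", "chelovyan", "stradova", "vakarina", "vashchenko", "ushakov", "rybakov", "lobov"]
def pyWSS : List String := ["gribacheva", "krotenko", "shkavro", "medvedev"]
def pyHWAC : List String := ["strelbitskaya", "shahtarin", "turusheva"]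
def pyESS : List String := ["mansurova"]

def get_user_group (username : String) : Option String :=
  let username_clean := PySem.Str.lower username
  if pyAR.any (fun name => PySem.Str.isIn name username_clean) then some "AR"
  else if pySC.any (fun name => PySem.Str.isIn name username_clean) then some "SC"
  else if pyWSS.any (fun name => PySem.Str.isIn name username_clean) then some "WSS"
  else if pyHWAC.any (fun name => PySem.Str.isIn name username_clean) then some "HWAC"
  else if pyESS.any (fun name => PySem.Str.isIn name username_clean) then some "ESS"
  else none

-- ===== PORT B =====
-- PATTERN_GROUP.items() of B's literal dict (keys distinct, insertion order)
def pyPATTERN_GROUP : List (String × String) :=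
  [("chernova", "AR"), ("stepanova", "AR"), ("sidelnikova", "AR"), ("mitchishnina", "AR"),
   ("pitkina", "AR"), ("legostaev1", "AR"),
   ("vasilkovskaya", "SC"), ("karnauhova_av", "SC"), ("neustroeva", "SC"), ("gavrilovskaya", "SC"),
   ("vashchenko_sa", "SC"), ("polyakov", "SC"), ("chelovyan", "SC"), ("stradova", "SC"),
   ("vakarina", "SC"), ("vashchenko", "SC"), ("ushakov", "SC"), ("rybakov", "SC"), ("lobov", "SC"),
   ("gribacheva", "WSS"), ("krotenko", "WSS"), ("shkavro", "WSS"), ("medvedev", "WSS"),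
   ("strelbitskaya", "HWAC"), ("shahtarin", "HWAC"), ("turusheva", "HWAC"),
   ("mansurova", "ESS")]

def pyORDER : List String := ["AR", "SC", "WSS", "HWAC", "ESS"]

-- PRIORITY = {g: i for i, g in enumerate(ORDER)}
def pyPRIORITY : PySem.Dict String Int :=
  PySem.Dict.ofList ((PySem.List.enumerate pyORDER).map (fun ig => (ig.2, ig.1)))

def get_user_group_alt (username : String) : Option String :=
  let u := PySem.Str.lower username
  -- ranks = [PRIORITY[g] for p, g in PATTERN_GROUP.items() if p in u]
  -- (PRIORITY[g]: every g is a key of PRIORITY, so getD's default is never reached)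
  let ranks := (pyPATTERN_GROUP.filter (fun pg => PySem.Str.isIn pg.1 u)).map
      (fun pg => PySem.Dict.getD pyPRIORITY pg.2 0)
  if ranks.isEmpty then none
  else (PySem.List.min? ranks (fun y => y)).bind (fun m => PySem.List.pyGet? pyORDER m)

-- ===== PRECONDITION & SPEC =====
def Spec_get_user_group (username : String) (out : Option String) : Prop := out = get_user_group_alt username
instance (username : String) (out : Option String) : Decidable (Spec_get_user_group username out) := by unfold Spec_get_user_group; infer_instance

-- ===== CLAIM =====
def Claim_equal_get_user_group : Prop := ∀ (username : String), Dom_get_user_group username → Spec_get_user_group username (get_user_group username)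

-- ===== LEMMAS AND PROOFS =====

-- B's flat table is A's five tables tagged with their group names and concatenated in order
lemma flat_eq : pyPATTERN_GROUP =
    pyAR.map (fun p => (p, "AR")) ++ (pySC.map (fun p => (p, "SC")) ++ (pyWSS.map (fun p => (p, "WSS"))
      ++ (pyHWAC.map (fun p => (p, "HWAC")) ++ (pyESS.map (fun p => (p, "ESS")) ++ [])))) := by
  rfl

-- filter+map over one tagged segment peels off as a constant-rank segment
lemma seg_peel (f : String → Bool) (rk : String → Int) (g : String) (ps : List String)
    (rest : List (String × String)) :
    ((ps.map (fun p => (p, g)) ++ rest).filter (fun pg => f pg.1)).map (fun pg => rk pg.2)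
      = (ps.filter f).map (fun _ => rk g)
        ++ (rest.filter (fun pg => f pg.1)).map (fun pg => rk pg.2) := by
  rw [List.filter_append, List.map_append, List.filter_map, List.map_map]
  rfl

-- min of a list headed by a nonempty all-i segment whose tail is ≥ i, is i
lemma min_head_const (i : Int) (l m : List Int) (hl : l ≠ [])
    (hall : ∀ x ∈ l, x = i) (hm : ∀ x ∈ m, i ≤ x) :
    PySem.List.min? (l ++ m) (fun y => y) = some i := by
  obtain ⟨a, t, rfl⟩ := List.exists_cons_of_ne_nil hl
  have ha : a = i := hall a (by simp)
  rw [List.cons_append, PySem.List.min?_id_cons]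
  have hle : ∀ y ∈ t ++ m, i ≤ y := by
    intro y hy
    rcases List.mem_append.1 hy with h | h
    · exact le_of_eq (hall y (List.mem_cons_of_mem a h)).symm
    · exact hm y h
  have h1 : (t ++ m).foldl min a ≤ a := (PySem.List.foldl_min_le (t ++ m) a).1
  rcases PySem.List.foldl_min_mem (t ++ m) a with h | h
  · rw [h, ha]
  · have h2 := hle _ h
    have : (t ++ m).foldl min a = i := le_antisymm (ha ▸ h1) h2
    rw [this]

-- a segment whose group test fails contributes nothing
lemma seg_nil {f : String → Bool} {ps : List String} (h : ps.any f = false) (i : Int) :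
    (ps.filter f).map (fun _ => i) = [] := by
  have : ps.filter f = [] := List.filter_eq_nil_iff.2 (by simpa [List.any_eq_false] using h)
  simp [this]

-- a segment whose group test succeeds is nonempty
lemma seg_ne {f : String → Bool} {ps : List String} (h : ps.any f = true) (i : Int) :
    (ps.filter f).map (fun _ => i) ≠ [] := by
  simp only [ne_eq, List.map_eq_nil_iff, List.filter_eq_nil_iff]
  rcases List.any_eq_true.1 h with ⟨x, hx, hfx⟩
  exact fun hall => hall x hx hfx

-- every element of a constant segment is that constant
lemma seg_const {f : String → Bool} {ps : List String} {i : Int} :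
    ∀ x ∈ (ps.filter f).map (fun _ => i), x = i := by
  intro x hx
  rcases List.mem_map.1 hx with ⟨_, _, rfl⟩
  rfl

-- B's selection step: a nonempty minimal-rank segment in front decides the result
lemma pick (f : String → Bool) (ps : List String) (i : Int) (rest : List Int) (g : String)
    (hps : ps.any f = true) (hrest : ∀ x ∈ rest, i ≤ x)
    (hget : PySem.List.pyGet? pyORDER i = some g) :
    (if ((ps.filter f).map (fun _ => i) ++ rest).isEmpty then none
     else (PySem.List.min? ((ps.filter f).map (fun _ => i) ++ rest) (fun y => y)).bind
        (fun m => PySem.List.pyGet? pyORDER m)) = some g := by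
  have hne : ((ps.filter f).map (fun _ => i) ++ rest) ≠ [] := by
    intro h
    exact seg_ne hps i (List.append_eq_nil_iff.1 h).1
  rw [if_neg (by simpa [List.isEmpty_iff] using hne),
      min_head_const i _ rest (seg_ne hps i) seg_const hrest]
  simpa using hget

-- the whole equivalence, abstracted over the (lower-cased) membership test
lemma core (f : String → Bool) :
    (if pyAR.any f then some "AR"
     else if pySC.any f then some "SC"
     else if pyWSS.any f then some "WSS"
     else if pyHWAC.any f then some "HWAC"
     else if pyESS.any f then some "ESS"
     else none)
    = (if ((pyPATTERN_GROUP.filter (fun pg => f pg.1)).map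
            (fun pg => PySem.Dict.getD pyPRIORITY pg.2 0)).isEmpty then none
       else (PySem.List.min? ((pyPATTERN_GROUP.filter (fun pg => f pg.1)).map
            (fun pg => PySem.Dict.getD pyPRIORITY pg.2 0)) (fun y => y)).bind
          (fun m => PySem.List.pyGet? pyORDER m)) := by
  have rkAR : PySem.Dict.getD pyPRIORITY "AR" 0 = 0 := by rfl
  have rkSC : PySem.Dict.getD pyPRIORITY "SC" 0 = 1 := by rfl
  have rkWSS : PySem.Dict.getD pyPRIORITY "WSS" 0 = 2 := by rfl
  have rkHWAC : PySem.Dict.getD pyPRIORITY "HWAC" 0 = 3 := by rfl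
  have rkESS : PySem.Dict.getD pyPRIORITY "ESS" 0 = 4 := by rfl
  simp only [flat_eq,
    seg_peel f (fun g => PySem.Dict.getD pyPRIORITY g 0) "AR" pyAR,
    seg_peel f (fun g => PySem.Dict.getD pyPRIORITY g 0) "SC" pySC,
    seg_peel f (fun g => PySem.Dict.getD pyPRIORITY g 0) "WSS" pyWSS,
    seg_peel f (fun g => PySem.Dict.getD pyPRIORITY g 0) "HWAC" pyHWAC,
    seg_peel f (fun g => PySem.Dict.getD pyPRIORITY g 0) "ESS" pyESS,
    rkAR, rkSC, rkWSS, rkHWAC, rkESS, List.filter_nil, List.map_nil]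
  cases h0 : pyAR.any f
  · rw [seg_nil h0 0, List.nil_append]
    cases h1 : pySC.any f
    · rw [seg_nil h1 1, List.nil_append]
      cases h2 : pyWSS.any f
      · rw [seg_nil h2 2, List.nil_append]
        cases h3 : pyHWAC.any f
        · rw [seg_nil h3 3, List.nil_append]
          cases h4 : pyESS.any f
          · rw [seg_nil h4 4, List.nil_append]
            simp
          · have hrest : ∀ x ∈ ([] : List Int), (4:Int) ≤ x := by simp
            rw [pick f pyESS 4 [] "ESS" h4 hrest (by rfl)]
            simp
        · have hrest : ∀ x ∈ (pyESS.filter f).map (fun _ => (4:Int)) ++ ([] : List Int),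
              (3:Int) ≤ x := by
            intro x hx
            simp only [List.mem_append, List.not_mem_nil, or_false] at hx
            rw [seg_const x hx]; norm_num
          rw [pick f pyHWAC 3 _ "HWAC" h3 hrest (by rfl)]
          simp
      · have hrest : ∀ x ∈ (pyHWAC.filter f).map (fun _ => (3:Int))
              ++ ((pyESS.filter f).map (fun _ => (4:Int)) ++ ([] : List Int)),
            (2:Int) ≤ x := by
          intro x hx
          simp only [List.mem_append, List.not_mem_nil, or_false] at hx
          rcases hx with h | h <;> (rw [seg_const x h]; norm_num)
        rw [pick f pyWSS 2 _ "WSS" h2 hrest (by rfl)]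
        simp
    · have hrest : ∀ x ∈ (pyWSS.filter f).map (fun _ => (2:Int))
            ++ ((pyHWAC.filter f).map (fun _ => (3:Int))
              ++ ((pyESS.filter f).map (fun _ => (4:Int)) ++ ([] : List Int))),
          (1:Int) ≤ x := by
        intro x hx
        simp only [List.mem_append, List.not_mem_nil, or_false] at hx
        rcases hx with h | h | h <;> (rw [seg_const x h]; norm_num)
      rw [pick f pySC 1 _ "SC" h1 hrest (by rfl)]
      simp
  · have hrest : ∀ x ∈ (pySC.filter f).map (fun _ => (1:Int))
          ++ ((pyWSS.filter f).map (fun _ => (2:Int))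
            ++ ((pyHWAC.filter f).map (fun _ => (3:Int))
              ++ ((pyESS.filter f).map (fun _ => (4:Int)) ++ ([] : List Int)))),
        (0:Int) ≤ x := by
      intro x hx
      simp only [List.mem_append, List.not_mem_nil, or_false] at hx
      rcases hx with h | h | h | h <;> (rw [seg_const x h]; norm_num)
    rw [pick f pyAR 0 _ "AR" h0 hrest (by rfl)]
    simp

-- ===== VERDICT =====
theorem get_user_group_spec : Claim_equal_get_user_group := by
  intro username _
  unfold Spec_get_user_group get_user_group get_user_group_alt
  exact core (fun name => PySem.Str.isIn name (PySem.Str.lower username))
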